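-- pv_equiv track=rewrite | github.com/mcooper44/housing-cost-profiler | h_util.py | get_sa
-- ===== SOURCE A (Python) =====
-- from typing import Union
--
-- def process_ap(lst: list, lbl: str, max_rep: int=2):
--     '''
--     take an ez-address-parser list and a specific
--     label and return a string made of up those elements
--     e.g. postal code, municipality
--     '''
--     r = []
--     for t in lst:
--         v,l = t
--         if l == lbl:
--             if len(r) < max_rep:
--                 r.append(v)
--     return ' '.join(r) if r else None
--
-- def get_sa(lst: list) -> Union[str, None]:
--     '''
--     get street address
--     call process_ap with a list of street
--     address labels to recompose the street address
--     into a distinct string for logging in the dbase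
--     '''
--
--     ls = ['StreetNumber', 'StreetName', 'StreetType',
--           'StreetDirection']
--     s = []
--     for v in ls:
--         t = process_ap(lst, v)
--         if t:
--             s.append(t)
--     return ' '.join(s) if s else None
-- ===== SOURCE B (Python) =====
-- def get_sa(lst):
--     '''
--     get street address: group values by label in one pass,
--     then emit the four street labels in fixed order
--     '''
--     labels = ('StreetNumber', 'StreetName', 'StreetType', 'StreetDirection')
--     groups = {}
--     for v, l in lst:
--         groups.setdefault(l, []).append(v)
--     parts = []
--     for lbl in labels:
--         frag = ' '.join(groups.get(lbl, [])[:2])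
--         if frag:
--             parts.append(frag)
--     return ' '.join(parts) if parts else None
-- ===== Notes on version B (the rewrite author's own statement) =====
-- stated objective: alternative
-- what changed: Replaces A's four full scans of the list (one process_ap call per street label) with a single grouping pass that buckets values by label in a dict, then emits the four labels in fixed order taking the first two values of each.
import Mathlib
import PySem

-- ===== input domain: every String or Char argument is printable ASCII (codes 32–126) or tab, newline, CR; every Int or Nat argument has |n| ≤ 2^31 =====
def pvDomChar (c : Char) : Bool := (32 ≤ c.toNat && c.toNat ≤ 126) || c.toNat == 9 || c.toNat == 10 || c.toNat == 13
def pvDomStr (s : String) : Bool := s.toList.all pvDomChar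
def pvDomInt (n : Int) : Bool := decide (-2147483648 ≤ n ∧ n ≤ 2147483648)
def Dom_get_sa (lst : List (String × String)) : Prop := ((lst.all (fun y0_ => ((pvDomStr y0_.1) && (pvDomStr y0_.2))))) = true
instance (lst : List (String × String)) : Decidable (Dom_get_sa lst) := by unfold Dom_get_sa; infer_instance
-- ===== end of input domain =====

-- B groups values by label in ONE pass over the list (dict of label → values) instead of
-- A's four full scans via process_ap; same return value everywhere (objective: alternative).


-- ===== PORT A =====
def process_ap (lst : List (String × String)) (lbl : String) (max_rep : Int) : Option String :=
  let r := lst.foldl (fun r t =>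
    if t.2 == lbl then (if (r.length : Int) < max_rep then r ++ [t.1] else r) else r) []
  if r = [] then none else some (PySem.Str.join " " r)

def get_sa (lst : List (String × String)) : Option String :=
  let ls := ["StreetNumber", "StreetName", "StreetType", "StreetDirection"]
  let s := ls.foldl (fun s v =>
    match process_ap lst v 2 with
    | none => s
    | some t => if t ≠ "" then s ++ [t] else s) []
  if s = [] then none else some (PySem.Str.join " " s)

-- ===== PORT B =====
def get_sa_alt (lst : List (String × String)) : Option String :=
  let labels := ["StreetNumber", "StreetName", "StreetType", "StreetDirection"]
  let groups := lst.foldl (fun d p => d.modify p.2 [] (fun g => g ++ [p.1]))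
    (PySem.Dict.empty : PySem.Dict String (List String))
  let parts := labels.foldl (fun parts lbl =>
    let frag := PySem.Str.join " " (PySem.List.slice (groups.getD lbl []) none (some 2))
    if frag ≠ "" then parts ++ [frag] else parts) []
  if parts = [] then none else some (PySem.Str.join " " parts)

-- ===== PRECONDITION & SPEC =====
def Spec_get_sa (lst : List (String × String)) (out : Option String) : Prop := out = get_sa_alt lst
instance (lst : List (String × String)) (out : Option String) : Decidable (Spec_get_sa lst out) := by unfold Spec_get_sa; infer_instance

-- ===== CLAIM (what is proved, stated in full; the proofs are below) =====
def Claim_equal_get_sa : Prop := ∀ (lst : List (String × String)), Dom_get_sa lst → Spec_get_sa lst (get_sa lst)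

-- ===== LEMMAS AND PROOFS =====

-- A's inner loop collects the first two matching values
theorem procA_fold (lst : List (String × String)) (lbl : String) (r0 : List String)
    (h : r0.length ≤ 2) :
    lst.foldl (fun r t =>
      if t.2 == lbl then (if (r.length : Int) < 2 then r ++ [t.1] else r) else r) r0
      = (r0 ++ (lst.filter (fun p => p.2 == lbl)).map (·.1)).take 2 := by
  induction lst generalizing r0 with
  | nil => simp [List.take_of_length_le (by simpa using h)]
  | cons t ts ih =>
    rw [List.foldl_cons, List.filter_cons]
    by_cases ht : (t.2 == lbl) = true
    · rw [if_pos ht, if_pos ht]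
      by_cases hl : ((r0.length : Int) < 2)
      · rw [if_pos hl, ih _ (by simp; omega)]
        simp
      · have h2 : 2 ≤ r0.length := by omega
        rw [if_neg hl, ih _ h, List.map_cons,
          List.take_append_of_le_length h2, List.take_append_of_le_length h2]
    · rw [if_neg ht, if_neg ht, ih _ h]

-- B's grouping dict holds, per label, exactly the matching values in order
theorem groupB (lst : List (String × String)) (lbl : String) :
    (lst.foldl (fun d p => d.modify p.2 [] (fun g => g ++ [p.1]))
      (PySem.Dict.empty : PySem.Dict String (List String))).getD lbl []
      = (lst.filter (fun p => p.2 == lbl)).map (·.1) := by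
  induction lst with
  | nil => simp [PySem.Dict.getD_empty]
  | cons t ts ih =>
    -- move the head's modify into the getD via the generalized fold lemma
    have key : ∀ (d : PySem.Dict String (List String)),
        (ts.foldl (fun d p => d.modify p.2 [] (fun g => g ++ [p.1])) d).getD lbl []
          = d.getD lbl [] ++ (ts.filter (fun p => p.2 == lbl)).map (·.1) := by
      intro d
      have := PySem.Dict.getD_foldl_modify_append
        (l := ts.map (fun p => (p.2, p.1))) (d := d) (c := lbl)
      rw [List.foldl_map] at this
      simpa [List.filter_map, Function.comp] using this
    rw [List.foldl_cons, key]
    by_cases ht : t.2 == lbl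
    · have heq : lbl = t.2 := (eq_of_beq ht).symm
      subst heq
      rw [PySem.Dict.getD_modify_self, List.filter_cons, if_pos ht]
      simp [PySem.Dict.getD_empty]
    · have hne : lbl ≠ t.2 := fun h => ht (by simp [h])
      rw [PySem.Dict.getD_modify_of_ne _ _ _ hne, List.filter_cons, if_neg ht]
      simp [PySem.Dict.getD_empty]

-- per-label: A's appended fragment equals B's
theorem step_eq (lst : List (String × String)) (lbl : String) (s : List String) :
    (match process_ap lst lbl 2 with
      | none => s
      | some t => if t ≠ "" then s ++ [t] else s)
    = (let frag := PySem.Str.join " "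
        (PySem.List.slice ((lst.foldl (fun d p => d.modify p.2 [] (fun g => g ++ [p.1]))
          (PySem.Dict.empty : PySem.Dict String (List String))).getD lbl []) none (some 2));
       if frag ≠ "" then s ++ [frag] else s) := by
  have hslice : PySem.List.slice ((lst.foldl (fun d p => d.modify p.2 [] (fun g => g ++ [p.1]))
      (PySem.Dict.empty : PySem.Dict String (List String))).getD lbl []) none (some 2)
      = ((lst.filter (fun p => p.2 == lbl)).map (·.1)).take 2 := by
    rw [groupB]
    simpa using PySem.List.slice_to ((lst.filter (fun p => p.2 == lbl)).map (·.1))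
      (b := 2) (by norm_num)
  have hr := procA_fold lst lbl [] (by simp)
  simp only [process_ap, hr, List.nil_append] at *
  rw [hslice]
  by_cases hnil : ((lst.filter (fun p => p.2 == lbl)).map (·.1)).take 2 = []
  · simp [hnil, PySem.Str.join]
  · simp only [hnil, if_false]

-- ===== VERDICT (by name: the statement is the Claim_ definition above) =====
theorem get_sa_spec : Claim_equal_get_sa := by
  intro lst _
  unfold Spec_get_sa get_sa get_sa_alt
  simp only [List.foldl_cons, List.foldl_nil]
  rw [step_eq, step_eq, step_eq, step_eq]
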